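-- pv_equiv track=rewrite | github.com/minosmouro/qd-genesis | backend/properties/mappers/property_mapper.py | _derive_category_from_subtypes
-- ===== SOURCE A (Python) =====
-- from typing import Dict, Any, List, Optional
--
-- def _derive_category_from_subtypes(property_type: Optional[str], unit_subtypes: Optional[List[str]]) -> Optional[str]:
--     """Deriva categoria interna a partir dos unitSubTypes do CanalPro.
--
--     Retorna valores compatíveis com o mapeamento de exportação (ex.: 'Studio', 'Duplex',
--     'Cobertura', 'Térrea', 'Sobrado', 'Kitnet/Conjugado', 'Padrão').
--     """
--     try:
--         if not unit_subtypes or not isinstance(unit_subtypes, list):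
--             return None
--
--         # Normalizar para upper sem espaços
--         subs = [str(s).strip().upper() for s in unit_subtypes if s]
--         pt = (property_type or '').strip().upper()
--
--         if pt == 'APARTMENT':
--             if 'STUDIO' in subs:
--                 return 'Studio'
--             if 'DUPLEX' in subs:
--                 return 'Duplex'
--             if 'PENTHOUSE' in subs:
--                 return 'Cobertura'
--             # Sem subtipos específicos → padrão
--             return 'Padrão'
--
--         if pt in ('HOUSE', 'HOME'):
--             if 'SINGLE_STOREY_HOUSE' in subs:
--                 return 'Térrea'
--             if 'TWO_STORY_HOUSE' in subs:
--                 return 'Sobrado'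
--             if 'KITNET' in subs:
--                 return 'Kitnet/Conjugado'
--             return 'Padrão'
--
--         if pt in ('CASA_CONDOMINIO', 'CONDOMINIUM'):
--             if 'SINGLE_STOREY_HOUSE' in subs:
--                 return 'Térrea'
--             if 'TWO_STORY_HOUSE' in subs:
--                 return 'Sobrado'
--             if 'KITNET' in subs:
--                 return 'Kitnet/Conjugado'
--             # Condomínio sem especificação → Padrão
--             return 'Padrão'
--
--         # Tipos não mapeados: não inferir
--         return None
--     except Exception:
--         return None
-- ===== SOURCE B (Python) =====
-- from typing import List, Optional
--
-- # Single pass over the subtype list: each (type-group, subtype) pair maps to a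
-- # (priority, category) entry; keep the lowest-priority hit seen and return its
-- # category, 'Padrao'-default for mapped types, None for unmapped types.
--
-- _GROUP = {
--     'APARTMENT': 'APT',
--     'HOUSE': 'H',
--     'HOME': 'H',
--     'CASA_CONDOMINIO': 'H',
--     'CONDOMINIUM': 'H',
-- }
--
-- _RANK = {
--     ('APT', 'STUDIO'): (0, 'Studio'),
--     ('APT', 'DUPLEX'): (1, 'Duplex'),
--     ('APT', 'PENTHOUSE'): (2, 'Cobertura'),
--     ('H', 'SINGLE_STOREY_HOUSE'): (0, 'Térrea'),
--     ('H', 'TWO_STORY_HOUSE'): (1, 'Sobrado'),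
--     ('H', 'KITNET'): (2, 'Kitnet/Conjugado'),
-- }
--
-- def _derive_category_from_subtypes(property_type: Optional[str], unit_subtypes: Optional[List[str]]) -> Optional[str]:
--     if not unit_subtypes or not isinstance(unit_subtypes, list):
--         return None
--     pt = (property_type or '').strip().upper()
--     group = _GROUP.get(pt)
--     if group is None:
--         return None
--     best = None
--     for s in unit_subtypes:
--         if not s:
--             continue
--         hit = _RANK.get((group, str(s).strip().upper()))
--         if hit is not None and (best is None or hit[0] < best[0]):
--             best = hit
--     return best[1] if best is not None else 'Padrão'
-- ===== Notes on version B (the rewrite author's own statement) =====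
-- stated objective: alternative
-- what changed: Instead of normalizing the whole list and testing membership of each hard-coded subtype in priority order, B makes a single pass over the raw subtype list, mapping each (type-group, normalized subtype) through a priority table and keeping the lowest-priority hit in an accumulator.
import Mathlib
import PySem

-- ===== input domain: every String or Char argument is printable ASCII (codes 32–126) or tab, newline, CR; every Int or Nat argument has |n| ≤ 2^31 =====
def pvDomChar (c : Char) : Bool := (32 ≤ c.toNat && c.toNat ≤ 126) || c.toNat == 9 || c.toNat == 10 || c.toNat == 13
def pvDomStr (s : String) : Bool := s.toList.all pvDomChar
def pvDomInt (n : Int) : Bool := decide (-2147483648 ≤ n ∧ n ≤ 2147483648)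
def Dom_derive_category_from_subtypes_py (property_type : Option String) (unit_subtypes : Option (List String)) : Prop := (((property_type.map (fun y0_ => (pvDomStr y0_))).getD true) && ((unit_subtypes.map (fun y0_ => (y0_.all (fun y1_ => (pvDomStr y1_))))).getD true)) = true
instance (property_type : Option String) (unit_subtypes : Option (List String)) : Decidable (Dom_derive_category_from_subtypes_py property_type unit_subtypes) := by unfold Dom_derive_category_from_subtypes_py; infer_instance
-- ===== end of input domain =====

-- B replaces A's priority cascade of membership tests over a normalized list by ONE
-- pass over the raw subtype list keeping the lowest-priority table hit in an
-- accumulator (objective: alternative).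

-- ===== PORT A =====
def derive_category_from_subtypes_py (property_type : Option String) (unit_subtypes : Option (List String)) : Option String :=
  match unit_subtypes with
  | none => none
  | some us =>
    if us = [] then none
    else
      let subs := (us.filter (fun s => s != "")).map (fun s => PySem.Str.upper (PySem.Str.strip s))
      let pt := PySem.Str.upper (PySem.Str.strip (property_type.getD ""))
      if pt = "APARTMENT" then
        if "STUDIO" ∈ subs then some "Studio"
        else if "DUPLEX" ∈ subs then some "Duplex"
        else if "PENTHOUSE" ∈ subs then some "Cobertura"
        else some "Padrão"
      else if pt = "HOUSE" ∨ pt = "HOME" then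
        if "SINGLE_STOREY_HOUSE" ∈ subs then some "Térrea"
        else if "TWO_STORY_HOUSE" ∈ subs then some "Sobrado"
        else if "KITNET" ∈ subs then some "Kitnet/Conjugado"
        else some "Padrão"
      else if pt = "CASA_CONDOMINIO" ∨ pt = "CONDOMINIUM" then
        if "SINGLE_STOREY_HOUSE" ∈ subs then some "Térrea"
        else if "TWO_STORY_HOUSE" ∈ subs then some "Sobrado"
        else if "KITNET" ∈ subs then some "Kitnet/Conjugado"
        else some "Padrão"
      else none

-- ===== PORT B =====
def pvGroupTable : PySem.Dict String String :=
  PySem.Dict.ofList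
    [("APARTMENT", "APT"), ("HOUSE", "H"), ("HOME", "H"),
     ("CASA_CONDOMINIO", "H"), ("CONDOMINIUM", "H")]

def pvRankTable : PySem.Dict (String × String) (Nat × String) :=
  PySem.Dict.ofList
    [(("APT", "STUDIO"), (0, "Studio")),
     (("APT", "DUPLEX"), (1, "Duplex")),
     (("APT", "PENTHOUSE"), (2, "Cobertura")),
     (("H", "SINGLE_STOREY_HOUSE"), (0, "Térrea")),
     (("H", "TWO_STORY_HOUSE"), (1, "Sobrado")),
     (("H", "KITNET"), (2, "Kitnet/Conjugado"))]

-- the body of B's single loop: fold the next raw subtype into the best hit so far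
def pvRankLookup (group : String) (best : Option (Nat × String)) (s : String) : Option (Nat × String) :=
  if s = "" then best
  else
    match pvRankTable.get? (group, PySem.Str.upper (PySem.Str.strip s)) with
    | none => best
    | some hit =>
      match best with
      | none => some hit
      | some b => if hit.1 < b.1 then some hit else best

def derive_category_from_subtypes_py_alt (property_type : Option String) (unit_subtypes : Option (List String)) : Option String :=
  match unit_subtypes with
  | none => none
  | some us =>
    if us = [] then none
    else
      let pt := PySem.Str.upper (PySem.Str.strip (property_type.getD ""))
      match pvGroupTable.get? pt with
      | none => none
      | some group =>
        match us.foldl (pvRankLookup group) none with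
        | some b => some b.2
        | none => some "Padrão"

-- ===== PRECONDITION & SPEC =====
def Spec_derive_category_from_subtypes_py (property_type : Option String) (unit_subtypes : Option (List String)) (out : Option String) : Prop := out = derive_category_from_subtypes_py_alt property_type unit_subtypes
instance (property_type : Option String) (unit_subtypes : Option (List String)) (out : Option String) : Decidable (Spec_derive_category_from_subtypes_py property_type unit_subtypes out) := by unfold Spec_derive_category_from_subtypes_py; infer_instance

-- ===== CLAIM (what is proved, stated in full; the proofs are below) =====
def Claim_equal_derive_category_from_subtypes_py : Prop := ∀ (property_type : Option String) (unit_subtypes : Option (List String)), Dom_derive_category_from_subtypes_py property_type unit_subtypes → Spec_derive_category_from_subtypes_py property_type unit_subtypes (derive_category_from_subtypes_py property_type unit_subtypes)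

-- ===== LEMMAS AND PROOFS =====

-- proof-only abbreviations
def pvNorm (s : String) : String := PySem.Str.upper (PySem.Str.strip s)

-- left-biased minimum by rank
def pvMerge (a b : Option (Nat × String)) : Option (Nat × String) :=
  match a, b with
  | none, b => b
  | a, none => a
  | some x, some y => if y.1 < x.1 then some y else some x

theorem pvRankLookup_eq_merge (group : String) (best : Option (Nat × String)) (s : String) :
    pvRankLookup group best s = pvMerge best (if s = "" then none else pvRankTable.get? (group, pvNorm s)) := by
  unfold pvRankLookup pvMerge pvNorm
  by_cases hs : s = "" <;> simp [hs] <;>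
    cases pvRankTable.get? (group, PySem.Str.upper (PySem.Str.strip s)) <;> cases best <;> simp

theorem pvMerge_none_right (a : Option (Nat × String)) : pvMerge a none = a := by cases a <;> rfl

theorem pvMerge_assoc (a b c : Option (Nat × String)) :
    pvMerge (pvMerge a b) c = pvMerge a (pvMerge b c) := by
  cases a with
  | none => rfl
  | some x =>
    cases b with
    | none => rw [show pvMerge (pvMerge (some x) none) c = pvMerge (some x) c from by rw [pvMerge_none_right]]; rfl
    | some y =>
      cases c with
      | none => rw [pvMerge_none_right, pvMerge_none_right]
      | some z =>
        simp only [pvMerge]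
        by_cases h1 : y.1 < x.1 <;> by_cases h2 : z.1 < y.1 <;> by_cases h3 : z.1 < x.1 <;>
          simp [h1, h2, h3] <;> omega

theorem pvFold_merge (group : String) :
    ∀ (us : List String) (acc : Option (Nat × String)),
      us.foldl (pvRankLookup group) acc = pvMerge acc (us.foldl (pvRankLookup group) none) := by
  intro us
  induction us with
  | nil => intro acc; simp only [List.foldl]; exact (pvMerge_none_right acc).symm
  | cons s l ih =>
    intro acc
    simp only [List.foldl]
    rw [ih (pvRankLookup group acc s), ih (pvRankLookup group none s)]
    rw [pvRankLookup_eq_merge group acc s, pvRankLookup_eq_merge group none s]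
    rw [show pvMerge none (if s = "" then none else pvRankTable.get? (group, pvNorm s)) = (if s = "" then none else pvRankTable.get? (group, pvNorm s)) from rfl]
    exact pvMerge_assoc acc _ _

def pvHit (t : String) (s : String) : Bool := (s != "") && (pvNorm s == t)

-- the one-pass fold computes the lowest-priority hit among all matching subtypes
theorem pvFold_none (group : String)
    (t0 t1 t2 c0 c1 c2 : String)
    (hlk : ∀ x, pvRankTable.get? (group, x) = if x = t0 then some (0, c0) else if x = t1 then some (1, c1)
                       else if x = t2 then some (2, c2) else none) :
    ∀ us : List String,
      us.foldl (pvRankLookup group) none =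
        (if us.any (pvHit t0) then some (0, c0)
         else if us.any (pvHit t1) then some (1, c1)
         else if us.any (pvHit t2) then some (2, c2) else none) := by
  intro us
  induction us with
  | nil => simp [List.foldl]
  | cons s l ih =>
    simp only [List.foldl]
    rw [pvFold_merge, ih]
    rw [show pvRankLookup group none s = pvMerge none (if s = "" then none else pvRankTable.get? (group, pvNorm s)) from pvRankLookup_eq_merge group none s]
    simp only [List.any_cons]
    by_cases hs : s = ""
    · simp [pvHit, hs, pvMerge]
    · rw [hlk (pvNorm s)]
      by_cases e0 : pvNorm s = t0
      · have hh0 : pvHit t0 s = true := by simp [pvHit, hs, e0]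
        simp only [hh0, Bool.true_or, if_pos e0]
        simp only [pvMerge]
        split_ifs with h <;> rfl
      · have hh0 : pvHit t0 s = false := by simp [pvHit, hs, e0]
        by_cases e1 : pvNorm s = t1
        · have hh1 : pvHit t1 s = true := by simp [pvHit, hs, e1]
          simp only [hh0, hh1, Bool.false_or, Bool.true_or, if_neg e0, if_pos e1]
          by_cases b0 : l.any (pvHit t0) <;>
            simp only [b0, Bool.false_eq_true, ite_true, ite_false, pvMerge] <;>
            split_ifs <;> rfl
        · have hh1 : pvHit t1 s = false := by simp [pvHit, hs, e1]
          by_cases e2 : pvNorm s = t2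
          · have hh2 : pvHit t2 s = true := by simp [pvHit, hs, e2]
            simp only [hh0, hh1, hh2, Bool.false_or, Bool.true_or, if_neg e0, if_neg e1, if_pos e2]
            by_cases b0 : l.any (pvHit t0) <;> by_cases b1 : l.any (pvHit t1) <;>
              simp only [b0, b1, Bool.false_eq_true, ite_true, ite_false, pvMerge] <;>
              split_ifs <;> rfl
          · have hh2 : pvHit t2 s = false := by simp [pvHit, hs, e2]
            simp only [hh0, hh1, hh2, Bool.false_or, if_neg e0, if_neg e1, if_neg e2]
            cases h : (if l.any (pvHit t0) = true then some ((0 : Nat), c0)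
              else if l.any (pvHit t1) = true then some ((1 : Nat), c1)
              else if l.any (pvHit t2) = true then some ((2 : Nat), c2) else none) <;> simp [pvMerge]

-- membership in A's normalized list = a one-pass any over the raw list
theorem pvMem_iff_any (t : String) (us : List String) :
    (t ∈ (us.filter (fun s => s != "")).map (fun s => PySem.Str.upper (PySem.Str.strip s)))
      ↔ us.any (pvHit t) = true := by
  simp only [List.mem_map, List.mem_filter, List.any_eq_true, pvHit, pvNorm,
    Bool.and_eq_true, bne_iff_ne, ne_eq, beq_iff_eq]
  constructor
  · rintro ⟨s, ⟨hm, hne⟩, he⟩; exact ⟨s, hm, hne, he⟩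
  · rintro ⟨s, hm, hne, he⟩; exact ⟨s, ⟨hm, hne⟩, he⟩

-- group-table lookup as an if-chain
theorem pvGroup_get (pt : String) : pvGroupTable.get? pt =
    (if pt = "APARTMENT" then some "APT" else if pt = "HOUSE" then some "H"
     else if pt = "HOME" then some "H" else if pt = "CASA_CONDOMINIO" then some "H"
     else if pt = "CONDOMINIUM" then some "H" else none) := by
  by_cases h1 : pt = "APARTMENT"
  · subst h1; decide
  by_cases h2 : pt = "HOUSE"
  · subst h2; decide
  by_cases h3 : pt = "HOME"
  · subst h3; decide
  by_cases h4 : pt = "CASA_CONDOMINIO"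
  · subst h4; decide
  by_cases h5 : pt = "CONDOMINIUM"
  · subst h5; decide
  rw [show pvGroupTable = PySem.Dict.mk
      [("APARTMENT", "APT"), ("HOUSE", "H"), ("HOME", "H"),
       ("CASA_CONDOMINIO", "H"), ("CONDOMINIUM", "H")] from rfl]
  simp only [PySem.Dict.get?_mk_cons]
  simp [PySem.Dict.get?, h1, h2, h3, h4, h5,
    beq_eq_false_iff_ne.mpr (Ne.symm h1), beq_eq_false_iff_ne.mpr (Ne.symm h2),
    beq_eq_false_iff_ne.mpr (Ne.symm h3), beq_eq_false_iff_ne.mpr (Ne.symm h4),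
    beq_eq_false_iff_ne.mpr (Ne.symm h5)]

-- rank-table lookups for each fixed group
theorem pvLkApt (x : String) : pvRankTable.get? ("APT", x) =
    (if x = "STUDIO" then some (0, "Studio") else if x = "DUPLEX" then some (1, "Duplex")
     else if x = "PENTHOUSE" then some (2, "Cobertura") else none) := by
  by_cases h1 : x = "STUDIO"
  · subst h1; decide
  by_cases h2 : x = "DUPLEX"
  · subst h2; decide
  by_cases h3 : x = "PENTHOUSE"
  · subst h3; decide
  rw [show pvRankTable = PySem.Dict.mk
      [(("APT", "STUDIO"), (0, "Studio")), (("APT", "DUPLEX"), (1, "Duplex")),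
       (("APT", "PENTHOUSE"), (2, "Cobertura")), (("H", "SINGLE_STOREY_HOUSE"), (0, "Térrea")),
       (("H", "TWO_STORY_HOUSE"), (1, "Sobrado")), (("H", "KITNET"), (2, "Kitnet/Conjugado"))] from rfl]
  simp only [PySem.Dict.get?_mk_cons]
  simp [PySem.Dict.get?, h1, h2, h3, Ne.symm h1, Ne.symm h2, Ne.symm h3]

theorem pvLkH (x : String) : pvRankTable.get? ("H", x) =
    (if x = "SINGLE_STOREY_HOUSE" then some (0, "Térrea") else if x = "TWO_STORY_HOUSE" then some (1, "Sobrado")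
     else if x = "KITNET" then some (2, "Kitnet/Conjugado") else none) := by
  by_cases h1 : x = "SINGLE_STOREY_HOUSE"
  · subst h1; decide
  by_cases h2 : x = "TWO_STORY_HOUSE"
  · subst h2; decide
  by_cases h3 : x = "KITNET"
  · subst h3; decide
  rw [show pvRankTable = PySem.Dict.mk
      [(("APT", "STUDIO"), (0, "Studio")), (("APT", "DUPLEX"), (1, "Duplex")),
       (("APT", "PENTHOUSE"), (2, "Cobertura")), (("H", "SINGLE_STOREY_HOUSE"), (0, "Térrea")),
       (("H", "TWO_STORY_HOUSE"), (1, "Sobrado")), (("H", "KITNET"), (2, "Kitnet/Conjugado"))] from rfl]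
  simp only [PySem.Dict.get?_mk_cons]
  simp [PySem.Dict.get?, h1, h2, h3, Ne.symm h1, Ne.symm h2, Ne.symm h3]

-- ===== VERDICT (by name: the statement is the Claim_ definition above) =====
theorem derive_category_from_subtypes_py_spec : Claim_equal_derive_category_from_subtypes_py := by
  intro property_type unit_subtypes hdom
  clear hdom
  unfold Spec_derive_category_from_subtypes_py
  cases unit_subtypes with
  | none => rfl
  | some us =>
    cases us with
    | nil => simp [derive_category_from_subtypes_py, derive_category_from_subtypes_py_alt]
    | cons a l =>
      simp only [derive_category_from_subtypes_py, derive_category_from_subtypes_py_alt,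
        if_neg (List.cons_ne_nil a l)]
      rw [pvGroup_get]
      generalize PySem.Str.upper (PySem.Str.strip (property_type.getD "")) = pt
      by_cases h1 : pt = "APARTMENT"
      · subst h1
        by_cases m0 : (a :: l).any (pvHit "STUDIO") <;>
          by_cases m1 : (a :: l).any (pvHit "DUPLEX") <;>
          by_cases m2 : (a :: l).any (pvHit "PENTHOUSE") <;>
          simp [pvFold_none "APT" "STUDIO" "DUPLEX" "PENTHOUSE" "Studio" "Duplex" "Cobertura" pvLkApt,
            pvMem_iff_any, m0, m1, m2]
      by_cases h2 : pt = "HOUSE"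
      · subst h2
        by_cases m0 : (a :: l).any (pvHit "SINGLE_STOREY_HOUSE") <;>
          by_cases m1 : (a :: l).any (pvHit "TWO_STORY_HOUSE") <;>
          by_cases m2 : (a :: l).any (pvHit "KITNET") <;>
          simp [pvFold_none "H" "SINGLE_STOREY_HOUSE" "TWO_STORY_HOUSE" "KITNET" "Térrea" "Sobrado" "Kitnet/Conjugado" pvLkH,
            pvMem_iff_any, m0, m1, m2]
      by_cases h3 : pt = "HOME"
      · subst h3
        by_cases m0 : (a :: l).any (pvHit "SINGLE_STOREY_HOUSE") <;>
          by_cases m1 : (a :: l).any (pvHit "TWO_STORY_HOUSE") <;>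
          by_cases m2 : (a :: l).any (pvHit "KITNET") <;>
          simp [pvFold_none "H" "SINGLE_STOREY_HOUSE" "TWO_STORY_HOUSE" "KITNET" "Térrea" "Sobrado" "Kitnet/Conjugado" pvLkH,
            pvMem_iff_any, m0, m1, m2]
      by_cases h4 : pt = "CASA_CONDOMINIO"
      · subst h4
        by_cases m0 : (a :: l).any (pvHit "SINGLE_STOREY_HOUSE") <;>
          by_cases m1 : (a :: l).any (pvHit "TWO_STORY_HOUSE") <;>
          by_cases m2 : (a :: l).any (pvHit "KITNET") <;>
          simp [pvFold_none "H" "SINGLE_STOREY_HOUSE" "TWO_STORY_HOUSE" "KITNET" "Térrea" "Sobrado" "Kitnet/Conjugado" pvLkH,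
            pvMem_iff_any, m0, m1, m2]
      by_cases h5 : pt = "CONDOMINIUM"
      · subst h5
        by_cases m0 : (a :: l).any (pvHit "SINGLE_STOREY_HOUSE") <;>
          by_cases m1 : (a :: l).any (pvHit "TWO_STORY_HOUSE") <;>
          by_cases m2 : (a :: l).any (pvHit "KITNET") <;>
          simp [pvFold_none "H" "SINGLE_STOREY_HOUSE" "TWO_STORY_HOUSE" "KITNET" "Térrea" "Sobrado" "Kitnet/Conjugado" pvLkH,
            pvMem_iff_any, m0, m1, m2]
      simp [h1, h2, h3, h4, h5]
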